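-- pv_equiv track=rewrite | github.com/palmer-j/project-euler-python | problems/p019.py | first_of_month_genr
-- ===== SOURCE A (Python) =====
-- month_len = {0: 31,
--              1: 28,
--              2: 31,
--              3: 30,
--              4: 31,
--              5: 30,
--              6: 31,
--              7: 31,
--              8: 30,
--              9: 31,
--              10: 30,
--              11: 31,
--              }
--
-- def first_of_month_genr(start=(0, 1901), end=(11, 2000)):
--
--     def is_leap(year):
--         if year % 4 == 0:
--             if year % 100 == 0 and not year % 400 == 0:
--                 return False
--             else:
--                 return True
--         return False
--
--     month = 0
--     year = 1900
--     day = 0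
--     while year < end[1] or (year <= end[1] and month <= end[0]):
--         if year > start[1] or (year >= start[1] and month >= start[0]):
--             yield day
--         day += month_len[month]
--         if month == 1 and is_leap(year):
--             day += 1
--         day %= 7
--         year_inc, month = divmod(month + 1, 12)
--         year += year_inc
--     pass
-- ===== SOURCE B (Python) =====
-- # B: same month-by-month walk over the requested range, but each month's weekday is
-- # computed independently by a closed-form proleptic-Gregorian day count (Monday = 0)
-- # instead of maintaining a running day-of-week accumulator.
-- _CUM = [0, 31, 59, 90, 120, 151, 181, 212, 243, 273, 304, 334]
--
--
-- def _is_leap(year):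
--     return year % 4 == 0 and (year % 100 != 0 or year % 400 == 0)
--
--
-- def _weekday_first(year, month):
--     """Weekday (Monday=0) of the first day of `month` (0-based) in `year`."""
--     y = year - 1
--     days = 365 * y + y // 4 - y // 100 + y // 400 + _CUM[month]
--     if month >= 2 and _is_leap(year):
--         days += 1
--     return days % 7
--
--
-- def first_of_month_genr(start=(0, 1901), end=(11, 2000)):
--     month, year = 0, 1900
--     while year < end[1] or (year == end[1] and month <= end[0]):
--         if year > start[1] or (year == start[1] and month >= start[0]):
--             yield _weekday_first(year, month)
--         if month < 11:
--             month += 1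
--         else:
--             month, year = 0, year + 1
-- ===== Notes on version B (the rewrite author's own statement) =====
-- stated objective: alternative
-- what changed: A maintains a running day-of-week accumulator updated each month with a month-length table, leap test and mod 7; B carries no weekday state and instead computes each emitted month's weekday independently from a closed-form proleptic-Gregorian day count (365*y + y//4 - y//100 + y//400 + cumulative month days, mod 7).
import Mathlib
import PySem

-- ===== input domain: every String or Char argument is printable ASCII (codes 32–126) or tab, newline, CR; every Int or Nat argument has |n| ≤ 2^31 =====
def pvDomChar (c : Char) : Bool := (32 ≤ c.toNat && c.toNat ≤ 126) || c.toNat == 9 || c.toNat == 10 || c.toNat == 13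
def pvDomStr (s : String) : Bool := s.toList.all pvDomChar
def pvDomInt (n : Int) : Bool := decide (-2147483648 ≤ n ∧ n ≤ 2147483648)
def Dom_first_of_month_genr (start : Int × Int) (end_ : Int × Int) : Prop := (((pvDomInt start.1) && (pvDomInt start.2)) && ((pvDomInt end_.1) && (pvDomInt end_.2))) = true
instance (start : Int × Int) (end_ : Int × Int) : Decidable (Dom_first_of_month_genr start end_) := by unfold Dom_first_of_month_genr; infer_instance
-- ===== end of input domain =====

-- B replaces A's running weekday accumulator by an independent closed-form day-count
-- weekday per emitted month (objective: alternative; generator equivalence is about the yielded sequence).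


-- ===== PORT A =====
def pvMonthLen : PySem.Dict Int Int :=
  PySem.Dict.ofList [(0, 31), (1, 28), (2, 31), (3, 30), (4, 31), (5, 30),
                     (6, 31), (7, 31), (8, 30), (9, 31), (10, 30), (11, 31)]

def pvIsLeapA (year : Int) : Bool :=
  if PySem.Int.mod year 4 = 0 then
    if PySem.Int.mod year 100 = 0 ∧ ¬ (PySem.Int.mod year 400 = 0) then false else true
  else false

-- A's while loop; fuel is an upper bound on the iteration count (totality guard only).
-- month stays in [0, 11] throughout, so month_len[month] never raises KeyError; getD 0 is exact.
def pvLoopA (fuel : Nat) (month year day sm sy em ey : Int) : List Int :=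
  match fuel with
  | 0 => []
  | Nat.succ fuel =>
    if year < ey ∨ (year ≤ ey ∧ month ≤ em) then
      let out := if year > sy ∨ (year ≥ sy ∧ month ≥ sm) then [day] else []
      let day1 := day + (pvMonthLen.get? month).getD 0
      let day2 := if month = 1 ∧ pvIsLeapA year = true then day1 + 1 else day1
      let day3 := PySem.Int.mod day2 7
      let yinc := PySem.Int.floordiv (month + 1) 12   -- divmod(month + 1, 12); divisor ≠ 0
      let month' := PySem.Int.mod (month + 1) 12
      out ++ pvLoopA fuel month' (year + yinc) day3 sm sy em ey
    else []

def first_of_month_genr (start : Int × Int) (end_ : Int × Int) : List Int :=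
  pvLoopA (((end_.2 - 1899) * 12 + 1).toNat) 0 1900 0 start.1 start.2 end_.1 end_.2

-- ===== PORT B =====
def pvCum : List Int := [0, 31, 59, 90, 120, 151, 181, 212, 243, 273, 304, 334]

def pvIsLeapB (year : Int) : Bool :=
  decide (PySem.Int.mod year 4 = 0) &&
    (decide (¬ PySem.Int.mod year 100 = 0) || decide (PySem.Int.mod year 400 = 0))

-- month ∈ [0, 11] on every call from the loop, so _CUM[month] never raises; getD 0 is exact
def pvWeekdayFirst (year month : Int) : Int :=
  let y := year - 1
  let days := 365 * y + PySem.Int.floordiv y 4 - PySem.Int.floordiv y 100 +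
      PySem.Int.floordiv y 400 + (PySem.List.pyGet? pvCum month).getD 0
  let days2 := if 2 ≤ month ∧ pvIsLeapB year = true then days + 1 else days
  PySem.Int.mod days2 7

-- B's while loop; same fuel bound as a totality guard.
def pvLoopB (fuel : Nat) (month year sm sy em ey : Int) : List Int :=
  match fuel with
  | 0 => []
  | Nat.succ fuel =>
    if year < ey ∨ (year = ey ∧ month ≤ em) then
      let out := if year > sy ∨ (year = sy ∧ month ≥ sm) then [pvWeekdayFirst year month] else []
      if month < 11 then out ++ pvLoopB fuel (month + 1) year sm sy em ey
      else out ++ pvLoopB fuel 0 (year + 1) sm sy em ey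
    else []

def first_of_month_genr_alt (start : Int × Int) (end_ : Int × Int) : List Int :=
  pvLoopB (((end_.2 - 1899) * 12 + 1).toNat) 0 1900 start.1 start.2 end_.1 end_.2

-- ===== PRECONDITION & SPEC =====
def Spec_first_of_month_genr (start : Int × Int) (end_ : Int × Int) (out : List Int) : Prop := out = first_of_month_genr_alt start end_
instance (start : Int × Int) (end_ : Int × Int) (out : List Int) : Decidable (Spec_first_of_month_genr start end_ out) := by unfold Spec_first_of_month_genr; infer_instance

-- ===== CLAIM (what is proved, stated in full; the proofs are below) =====
def Claim_equal_first_of_month_genr : Prop := ∀ (start : Int × Int) (end_ : Int × Int), Dom_first_of_month_genr start end_ → Spec_first_of_month_genr start end_ (first_of_month_genr start end_)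

-- ===== LEMMAS AND PROOFS =====

-- month lengths as a plain table, and pvD k = A's day accumulator before reduction:
-- days from 1900-01-01 to the first of month index k (k = 12*(year-1900) + month)
def pvMLen (m : Nat) : Int := [31, 28, 31, 30, 31, 30, 31, 31, 30, 31, 30, 31].getD m 0

def pvD : Nat → Int
  | 0 => 0
  | k + 1 => pvD k + pvMLen (k % 12) +
      (if k % 12 = 1 ∧ pvIsLeapA (1900 + (k / 12 : Nat)) = true then 1 else 0)

lemma pvIsLeapB_eq_A (y : Int) : pvIsLeapB y = pvIsLeapA y := by
  simp only [pvIsLeapA, pvIsLeapB]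
  by_cases h4 : PySem.Int.mod y 4 = 0 <;>
    by_cases h100 : PySem.Int.mod y 100 = 0 <;>
      by_cases h400 : PySem.Int.mod y 400 = 0 <;> simp_all

-- number of leap years in [1900, y): the four floor terms of B's formula, re-anchored
def pvLeapsBefore (year : Int) : Int :=
  (year - 1) / 4 - (year - 1) / 100 + (year - 1) / 400 - (1899 / 4 - 1899 / 100 + 1899 / 400)

-- closed-form day count at month index k, anchored at 1900-01-01
def pvDays1 (k : Int) : Int :=
  365 * (1900 + PySem.Int.floordiv k 12 - 1900) + pvLeapsBefore (1900 + PySem.Int.floordiv k 12) +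
    (PySem.List.pyGet? pvCum (PySem.Int.mod k 12)).getD 0 +
    (if 2 ≤ PySem.Int.mod k 12 ∧ pvIsLeapB (1900 + PySem.Int.floordiv k 12) = true then 1 else 0)

lemma pvLeapsBefore_succ (y : Int) :
    pvLeapsBefore (y + 1) = pvLeapsBefore y + (if pvIsLeapA y = true then 1 else 0) := by
  unfold pvLeapsBefore pvIsLeapA
  simp only [PySem.Int.mod_eq_emod_of_pos (by norm_num : (0:Int) < 4),
    PySem.Int.mod_eq_emod_of_pos (by norm_num : (0:Int) < 100),
    PySem.Int.mod_eq_emod_of_pos (by norm_num : (0:Int) < 400)]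
  have e : y + 1 - 1 = y := by ring
  rw [e]
  by_cases h4 : y % 4 = 0 <;> by_cases h100 : y % 100 = 0 <;> by_cases h400 : y % 400 = 0 <;>
    simp [h4, h100, h400] <;> omega

lemma pvCum_diff (m : Nat) (h : m < 11) :
    (PySem.List.pyGet? pvCum ((m : Int) + 1)).getD 0 - (PySem.List.pyGet? pvCum (m : Int)).getD 0
      = pvMLen m := by
  interval_cases m <;> decide

lemma pvDays1_succ (k : Nat) :
    pvDays1 ((k : Int) + 1) = pvDays1 (k : Int) + pvMLen (k % 12) +
      (if k % 12 = 1 ∧ pvIsLeapA (1900 + (k / 12 : Nat)) = true then 1 else 0) := by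
  obtain ⟨q, m, hm, rfl⟩ : ∃ q m, m < 12 ∧ k = 12 * q + m :=
    ⟨k / 12, k % 12, Nat.mod_lt _ (by norm_num), (Nat.div_add_mod k 12).symm⟩
  have hq : (12 * q + m) / 12 = q := by omega
  have hmm : (12 * q + m) % 12 = m := by omega
  rw [hq, hmm]
  unfold pvDays1
  simp only [pvIsLeapB_eq_A,
    PySem.Int.floordiv_eq_ediv_of_pos (by norm_num : (0:Int) < 12),
    PySem.Int.mod_eq_emod_of_pos (by norm_num : (0:Int) < 12)]
  rcases Nat.lt_or_ge m 11 with h11 | h11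
  · -- same year
    have e1 : ((12 * q + m : Nat) : Int) % 12 = (m : Int) := by push_cast; omega
    have e2 : ((12 * q + m : Nat) : Int) / 12 = (q : Int) := by push_cast; omega
    have e3 : ((12 * q + m : Nat) : Int) + 1 = ((12 * q + (m + 1) : Nat) : Int) := by push_cast; ring
    have e4 : ((12 * q + (m + 1) : Nat) : Int) % 12 = (m : Int) + 1 := by push_cast; omega
    have e5 : ((12 * q + (m + 1) : Nat) : Int) / 12 = (q : Int) := by push_cast; omega
    rw [e3, e4, e5, e1, e2]
    have hc := pvCum_diff m (by omega)
    rcases Bool.eq_false_or_eq_true (pvIsLeapA (1900 + (q : Int))) with hl | hl <;>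
      simp only [hl, Bool.false_eq_true, and_false, and_true, if_false] <;>
        (try split_ifs) <;> push_cast at hc ⊢ <;> omega
  · -- m = 11 : the year rolls over
    have hm11 : m = 11 := by omega
    subst hm11
    have e1 : ((12 * q + 11 : Nat) : Int) % 12 = 11 := by push_cast; omega
    have e2 : ((12 * q + 11 : Nat) : Int) / 12 = (q : Int) := by push_cast; omega
    have e3 : (((12 * q + 11 : Nat) : Int) + 1) % 12 = 0 := by push_cast; omega
    have e4 : (((12 * q + 11 : Nat) : Int) + 1) / 12 = (q : Int) + 1 := by push_cast; omega
    have c0 : (PySem.List.pyGet? pvCum (0 : Int)).getD 0 = 0 := by decide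
    have c11 : (PySem.List.pyGet? pvCum (11 : Int)).getD 0 = 334 := by decide
    have hL : pvLeapsBefore (1900 + ((q : Int) + 1)) =
        pvLeapsBefore (1900 + (q : Int)) +
          (if pvIsLeapA (1900 + (q : Int)) = true then 1 else 0) := by
      rw [show (1900 : Int) + ((q : Int) + 1) = 1900 + (q : Int) + 1 from by ring,
        pvLeapsBefore_succ]
    rw [e1, e2, e3, e4, c0, c11, hL]
    have hml : pvMLen 11 = 31 := by decide
    have hno : ¬ ((2:Int) ≤ 0) := by norm_num
    have hno2 : ¬ ((12 * q + 11) % 12 = 1) := by omega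
    rw [hmm] at hno2
    simp only [hno, hno2, false_and, if_false, hml,
      (by norm_num : ((2:Int) ≤ 11) ↔ True), true_and]
    split_ifs <;> omega

lemma pvDays1_eq_pvD (k : Nat) : pvDays1 (k : Int) = pvD k := by
  induction k with
  | zero => decide
  | succ k ih =>
      have h := pvDays1_succ k
      rw [pvD]
      push_cast
      push_cast at h
      rw [h, ih]

lemma pvWeekdayFirst_eq (k : Nat) :
    pvWeekdayFirst (1900 + ((k / 12 : Nat) : Int)) ((k % 12 : Nat) : Int)
      = PySem.Int.mod (pvD k) 7 := by
  rw [← pvDays1_eq_pvD]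
  have h1 : PySem.Int.floordiv (k : Int) 12 = ((k / 12 : Nat) : Int) := by
    rw [PySem.Int.floordiv_eq_ediv_of_pos (by norm_num : (0:Int) < 12)]; omega
  have h2 : PySem.Int.mod (k : Int) 12 = ((k % 12 : Nat) : Int) := by
    rw [PySem.Int.mod_eq_emod_of_pos (by norm_num : (0:Int) < 12)]; omega
  unfold pvWeekdayFirst pvDays1
  rw [h1, h2]
  simp only [
    PySem.Int.floordiv_eq_ediv_of_pos (by norm_num : (0:Int) < 4),
    PySem.Int.floordiv_eq_ediv_of_pos (by norm_num : (0:Int) < 100),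
    PySem.Int.floordiv_eq_ediv_of_pos (by norm_num : (0:Int) < 400),
    PySem.Int.mod_eq_emod_of_pos (by norm_num : (0:Int) < 7)]
  unfold pvLeapsBefore
  split_ifs <;> omega

lemma pvDictLen (m : Nat) (h : m < 12) : (pvMonthLen.get? (m : Int)).getD 0 = pvMLen m := by
  interval_cases m <;> decide

-- lockstep: the two loops agree whenever A's day state equals pvD k mod 7
lemma pvLoop_eq (sm sy em ey : Int) : ∀ (fuel : Nat) (k : Nat),
    pvLoopA fuel ((k % 12 : Nat) : Int) (1900 + ((k / 12 : Nat) : Int))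
        (PySem.Int.mod (pvD k) 7) sm sy em ey
    = pvLoopB fuel ((k % 12 : Nat) : Int) (1900 + ((k / 12 : Nat) : Int)) sm sy em ey := by
  intro fuel
  induction fuel with
  | zero => intro k; rfl
  | succ fuel ih =>
    intro k
    have hm12 : k % 12 < 12 := Nat.mod_lt _ (by norm_num)
    rw [pvLoopA, pvLoopB]
    set m : Int := ((k % 12 : Nat) : Int) with hm
    set y : Int := 1900 + ((k / 12 : Nat) : Int) with hy
    have hcond : (y < ey ∨ (y ≤ ey ∧ m ≤ em)) ↔ (y < ey ∨ (y = ey ∧ m ≤ em)) := by omega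
    have hyield : (y > sy ∨ (y ≥ sy ∧ m ≥ sm)) ↔ (y > sy ∨ (y = sy ∧ m ≥ sm)) := by omega
    by_cases hc : y < ey ∨ (y = ey ∧ m ≤ em)
    · rw [if_pos (hcond.mpr hc), if_pos hc]
      -- A's next state equals month index k + 1
      have hmon : PySem.Int.mod (m + 1) 12 = (((k + 1) % 12 : Nat) : Int) := by
        rw [PySem.Int.mod_eq_emod_of_pos (by norm_num)]
        have h1 : k = 12 * (k / 12) + k % 12 := (Nat.div_add_mod k 12).symm
        rw [hm]; push_cast; omega
      have hyr : y + PySem.Int.floordiv (m + 1) 12 = 1900 + (((k + 1) / 12 : Nat) : Int) := by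
        rw [PySem.Int.floordiv_eq_ediv_of_pos (by norm_num)]
        have h1 : k = 12 * (k / 12) + k % 12 := (Nat.div_add_mod k 12).symm
        rw [hm, hy]; push_cast; omega
      have hday : PySem.Int.mod
          ((if m = 1 ∧ pvIsLeapA y = true
            then PySem.Int.mod (pvD k) 7 + (pvMonthLen.get? m).getD 0 + 1
            else PySem.Int.mod (pvD k) 7 + (pvMonthLen.get? m).getD 0)) 7
          = PySem.Int.mod (pvD (k + 1)) 7 := by
        rw [hm, pvDictLen (k % 12) hm12]
        have hcast : (((k % 12 : Nat) : Int) = 1) ↔ (k % 12 = 1) := by exact_mod_cast Iff.rfl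
        have hD : pvD (k + 1) = pvD k + pvMLen (k % 12) +
            (if k % 12 = 1 ∧ pvIsLeapA (1900 + (k / 12 : Nat)) = true then 1 else 0) := rfl
        rw [hD]
        simp only [PySem.Int.mod_eq_emod_of_pos (by norm_num : (0:Int) < 7), hy]
        by_cases hcnd : k % 12 = 1 ∧ pvIsLeapA (1900 + (k / 12 : Nat)) = true
        · rw [if_pos ⟨hcast.mpr hcnd.1, hcnd.2⟩, if_pos hcnd]; omega
        · rw [if_neg (by rw [hcast]; exact hcnd), if_neg hcnd]; omega
      simp only
      rw [hmon, hyr, hday, ih (k + 1)]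
      have hout : (if y > sy ∨ (y ≥ sy ∧ m ≥ sm) then [PySem.Int.mod (pvD k) 7] else [])
          = (if y > sy ∨ (y = sy ∧ m ≥ sm) then [pvWeekdayFirst y m] else []) := by
        by_cases hg : y > sy ∨ (y = sy ∧ m ≥ sm)
        · rw [if_pos (hyield.mpr hg), if_pos hg, hm, hy, pvWeekdayFirst_eq]
        · rw [if_neg (by rw [hyield]; exact hg), if_neg hg]
      rw [hout]
      have h1 : k = 12 * (k / 12) + k % 12 := (Nat.div_add_mod k 12).symm
      by_cases h11 : m < 11
      · rw [if_pos h11]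
        have hm1 : m + 1 = (((k + 1) % 12 : Nat) : Int) := by rw [hm]; rw [hm] at h11; push_cast at h11 ⊢; omega
        have hy1 : y = 1900 + (((k + 1) / 12 : Nat) : Int) := by rw [hy]; rw [hm] at h11; push_cast at h11 ⊢; omega
        rw [hm1, hy1]
      · rw [if_neg h11]
        have hm0 : ((((k + 1) % 12 : Nat) : Int)) = (0 : Int) := by rw [hm] at h11; push_cast at h11 ⊢; omega
        have hy1 : y + 1 = 1900 + (((k + 1) / 12 : Nat) : Int) := by rw [hy]; rw [hm] at h11; push_cast at h11 ⊢; omega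
        rw [hm0, ← hy1]
    · rw [if_neg (by rw [hcond]; exact hc), if_neg hc]

-- ===== VERDICT (by name: the statement is the Claim_ definition above) =====
theorem first_of_month_genr_spec : Claim_equal_first_of_month_genr := by
  intro start end_ _
  show first_of_month_genr start end_ = first_of_month_genr_alt start end_
  unfold first_of_month_genr first_of_month_genr_alt
  have h := pvLoop_eq start.1 start.2 end_.1 end_.2 (((end_.2 - 1899) * 12 + 1).toNat) 0
  norm_num at h
  have h0 : pvD 0 % 7 = (0 : Int) := by decide
  rw [h0] at h
  exact h
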